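-- pv_equiv track=rewrite | github.com/KaaraOpCode/SIC-AI | wiki web crawling bot version two.py | is_article_link
-- ===== SOURCE A (Python) =====
-- ARTICLE_PREFIX = "/wiki/"
--
-- BAD_PREFIXES = (
--     "Category:", "File:", "Help:", "Portal:", "Special:", "Template:",
--     "Talk:", "Wikipedia:", "Module:", "Draft:", "Book:"
-- )
--
-- def is_article_link(href):
--     if not href or not href.startswith(ARTICLE_PREFIX):
--         return False
--     if "#" in href or "?" in href:
--         return False
--     topic = href.split(ARTICLE_PREFIX, 1)[-1]
--     for bad in BAD_PREFIXES:
--         if topic.startswith(bad):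
--             return False
--     return True
-- ===== SOURCE B (Python) =====
-- ARTICLE_PREFIX = "/wiki/"
--
-- NAMESPACES = frozenset({
--     "Category", "File", "Help", "Portal", "Special", "Template",
--     "Talk", "Wikipedia", "Module", "Draft", "Book"
-- })
--
-- def is_article_link(href):
--     if not href or href[:6] != ARTICLE_PREFIX:
--         return False
--     topic = href[6:]
--     if any(c in "#?" for c in topic):
--         return False
--     head, sep, _tail = topic.partition(":")
--     return not (sep and head in NAMESPACES)
-- ===== Notes on version B (the rewrite author's own statement) =====
-- stated objective: idiomatic
-- what changed: Replaces A's prefix-split plus loop of startswith tests against eleven colon-suffixed prefixes by direct slicing (href[:6]/href[6:]), a single character scan for '#'/'?', and one partition of the topic at its first colon with a frozenset membership test of the namespace name.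
import Mathlib
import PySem

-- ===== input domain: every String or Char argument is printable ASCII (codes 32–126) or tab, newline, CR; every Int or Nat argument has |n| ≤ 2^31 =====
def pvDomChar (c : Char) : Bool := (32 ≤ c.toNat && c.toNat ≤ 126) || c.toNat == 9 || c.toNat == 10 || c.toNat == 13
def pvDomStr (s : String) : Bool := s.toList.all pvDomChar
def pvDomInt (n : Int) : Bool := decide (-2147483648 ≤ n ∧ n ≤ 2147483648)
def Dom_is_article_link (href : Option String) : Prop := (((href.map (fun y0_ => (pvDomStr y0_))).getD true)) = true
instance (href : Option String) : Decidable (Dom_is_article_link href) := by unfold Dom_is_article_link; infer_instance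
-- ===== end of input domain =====

-- B replaces A's prefix-split and loop of startswith tests by direct slicing (href[:6]/href[6:]),
-- one character scan for '#'/'?', and a partition at the first colon with a set lookup (idiomatic; same cost).


-- ===== PORT A =====
def BAD_PREFIXES : List String :=
  ["Category:", "File:", "Help:", "Portal:", "Special:", "Template:",
   "Talk:", "Wikipedia:", "Module:", "Draft:", "Book:"]

-- the 'for bad in BAD_PREFIXES' loop with its early 'return False'
def checkBads (topic : String) : List String → Bool
  | [] => true
  | bad :: rest => if PySem.Str.startswith topic bad then false else checkBads topic rest

def is_article_link (href : Option String) : Bool :=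
  match href with
  | none => false
  | some h =>
    if (h == "") || !(PySem.Str.startswith h "/wiki/") then false
    else if PySem.Str.isIn "#" h || PySem.Str.isIn "?" h then false
    else
      let topic := (PySem.List.pyGet? ((PySem.Str.splitMax? h "/wiki/" 1).getD []) (-1)).getD ""
      checkBads topic BAD_PREFIXES

-- ===== PORT B =====
def NAMESPACES : List (List Char) :=
  ["Category".toList, "File".toList, "Help".toList, "Portal".toList, "Special".toList,
   "Template".toList, "Talk".toList, "Wikipedia".toList, "Module".toList, "Draft".toList,
   "Book".toList]

def is_article_link_alt (href : Option String) : Bool :=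
  match href with
  | none => false
  | some h =>
    let L := h.toList
    -- 'if not href or href[:6] != ARTICLE_PREFIX'
    if L.isEmpty || !(PySem.List.slice L none (some 6) == "/wiki/".toList) then false
    else
      let topic := PySem.List.slice L (some 6) none      -- href[6:]
      -- any(c in "#?" for c in topic)
      if topic.any (fun c => PySem.Chars.isIn [c] "#?".toList) then false
      else
        -- head, sep, _ = topic.partition(":") ported by hand (exact for the 1-char separator ":")
        let head := topic.takeWhile (fun c => c ≠ ':')
        let sep := topic.contains ':'
        !(sep && NAMESPACES.contains head)

-- ===== PRECONDITION & SPEC =====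
def Spec_is_article_link (href : Option String) (out : Bool) : Prop := out = is_article_link_alt href
instance (href : Option String) (out : Bool) : Decidable (Spec_is_article_link href out) := by unfold Spec_is_article_link; infer_instance

-- ===== CLAIM (what is proved, stated in full; the proofs are below) =====
def Claim_equal_is_article_link : Prop := ∀ (href : Option String), Dom_is_article_link href → Spec_is_article_link href (is_article_link href)

-- ===== LEMMAS AND PROOFS =====

-- the two first guards are the same Bool: '' / startswith versus isEmpty / take-6 slice
lemma guard1_eq (h : String) :
    ((h == "") || !(PySem.Str.startswith h "/wiki/"))
      = (h.toList.isEmpty || !(PySem.List.slice h.toList none (some 6) == "/wiki/".toList)) := by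
  have e1 : (h == "") = h.toList.isEmpty := by
    rw [Bool.eq_iff_iff]
    simp [List.isEmpty_iff, String.toList_eq_nil_iff]
  have e2 : PySem.Str.startswith h "/wiki/"
      = (PySem.List.slice h.toList none (some 6) == "/wiki/".toList) := by
    rw [PySem.List.slice_to h.toList (by norm_num : (0:Int) ≤ 6)]
    rw [Bool.eq_iff_iff]
    rw [show PySem.Str.startswith h "/wiki/" = PySem.Chars.startswith h.toList "/wiki/".toList from by simp]
    rw [PySem.Chars.startswith_iff]
    rw [List.prefix_iff_eq_take]
    rw [beq_iff_eq]
    rw [show ("/wiki/".toList).length = 6 from rfl]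
    rw [show ((6:Int).toNat) = 6 from rfl]
    exact eq_comm
  rw [e1, e2]

-- the one maxsplit=1 split of "/wiki/"++t at its leading separator
lemma go_split (t : List Char) :
    PySem.Chars.splitOnMax ("/wiki/".toList ++ t) "/wiki/".toList 1 = [[], t] := by
  unfold PySem.Chars.splitOnMax
  norm_num [List.length_append]
  rw [show "/wiki/".length = 6 from rfl]
  have h1 : PySem.Chars.splitOnMax.go "/wiki/".toList (6 + t.length + 1) 1 ("/wiki/".toList ++ t) [] []
      = PySem.Chars.splitOnMax.go "/wiki/".toList (6 + t.length) 0 t [] [[]] := by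
    rw [show (6 + t.length + 1) = (6 + t.length) + 1 from rfl]
    rw [PySem.Chars.splitOnMax.go.eq_def]
    simp
  rw [h1]
  cases t with
  | nil => rfl
  | cons c rest =>
    rw [show (6 + (c :: rest).length) = (6 + rest.length) + 1 from by simp only [List.length_cons]; omega]
    rw [PySem.Chars.splitOnMax.go.eq_def]
    simp

-- A's topic expression evaluates to the suffix after "/wiki/"
lemma topicA_eq (h : String) (t : List Char) (hL : h.toList = "/wiki/".toList ++ t) :
    (PySem.List.pyGet? ((PySem.Str.splitMax? h "/wiki/" 1).getD []) (-1)).getD ""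
      = String.ofList t := by
  have hs : PySem.Chars.splitMax? h.toList "/wiki/".toList 1 = some [[], t] := by
    rw [hL]
    simp only [PySem.Chars.splitMax?]
    rw [go_split]
    rfl
  have : PySem.Str.splitMax? h "/wiki/" 1 = some ["", String.ofList t] := by
    simp only [PySem.Str.splitMax?]
    rw [hs]
    rfl
  rw [this]
  simp [PySem.List.pyGet?, PySem.List.pyIdx?]

-- '#'/'?' substring tests on "/wiki/"++t versus the character scan over t
lemma hashq_eq (h : String) (t : List Char) (hL : h.toList = "/wiki/".toList ++ t) :
    (PySem.Str.isIn "#" h || PySem.Str.isIn "?" h)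
      = (t.any (fun c => PySem.Chars.isIn [c] "#?".toList)) := by
  rw [Bool.eq_iff_iff]
  simp only [Bool.or_eq_true, PySem.Str.isIn_iff_infix, List.any_eq_true]
  have mem_iff : ∀ (a : Char) (l : List Char), [a] <:+: l ↔ a ∈ l := by
    intro a l
    constructor
    · intro hi; exact hi.subset (List.mem_singleton_self a)
    · intro hm
      obtain ⟨s1, s2, rfl⟩ := List.append_of_mem hm
      exact ⟨s1, s2, by simp⟩
  constructor
  · rintro (hc | hc)
    · refine ⟨'#', ?_, by decide⟩
      have := (mem_iff '#' h.toList).1 (by simpa using hc)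
      rw [hL] at this; simpa using this
    · refine ⟨'?', ?_, by decide⟩
      have := (mem_iff '?' h.toList).1 (by simpa using hc)
      rw [hL] at this; simpa using this
  · rintro ⟨c, hc, hin⟩
    have hc2 : [c] <:+: "#?".toList := by
      rw [← PySem.Chars.isIn_iff_infix]; exact hin
    have : c ∈ ("#?".toList) := (mem_iff c _).1 hc2
    have hmem : c = '#' ∨ c = '?' := by simpa using this
    rcases hmem with rfl | rfl
    · exact Or.inl (by rw [show ("#" : String).toList = ['#'] from rfl]
                       exact (mem_iff '#' h.toList).2 (by rw [hL]; simp [hc]))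
    · exact Or.inr (by rw [show ("?" : String).toList = ['?'] from rfl]
                       exact (mem_iff '?' h.toList).2 (by rw [hL]; simp [hc]))

-- a colon-terminated prefix nm++[':'] (nm colon-free) is a prefix of t iff t contains ':' and
-- the part of t before its first ':' is exactly nm
lemma takeWhile_colon (nm rest : List Char) (hp : ':' ∉ nm) :
    List.takeWhile (fun c => c ≠ ':') (nm ++ ':' :: rest) = nm := by
  induction nm with
  | nil => simp
  | cons a as ih =>
    simp only [List.mem_cons, not_or] at hp
    have ha : ¬ a = ':' := fun h => hp.1 h.symm
    simp [ha]
    simpa using ih hp.2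

-- a list containing ':' splits as (part before first ':') ++ ':' :: rest
lemma colon_split (t : List Char) (hmem : ':' ∈ t) :
    ∃ rest, t = t.takeWhile (fun c => c ≠ ':') ++ ':' :: rest := by
  induction t with
  | nil => simp at hmem
  | cons a as ih =>
    by_cases ha : a = ':'
    · subst ha; exact ⟨as, by simp⟩
    · have hm : ':' ∈ as := by
        rcases List.mem_cons.1 hmem with h | h
        · exact absurd h.symm ha
        · exact h
      obtain ⟨rest, hrest⟩ := ih hm
      refine ⟨rest, ?_⟩
      simp only [List.takeWhile_cons, ha, decide_false, decide_not, Bool.not_false]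
      calc a :: as = a :: (as.takeWhile (fun c => c ≠ ':') ++ ':' :: rest) := by rw [← hrest]
        _ = _ := by simp

lemma colon_prefix_iff (nm t : List Char) (hp : ':' ∉ nm) :
    (nm ++ [':'] <+: t) ↔ (':' ∈ t ∧ t.takeWhile (fun c => c ≠ ':') = nm) := by
  constructor
  · rintro ⟨rest, hrest⟩
    subst hrest
    rw [List.append_assoc]
    exact ⟨by simp, takeWhile_colon nm rest hp⟩
  · rintro ⟨hmem, htake⟩
    obtain ⟨rest, hrest⟩ := colon_split t hmem
    exact ⟨rest, by rw [hrest, htake]; simp⟩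

-- the early-return chain over conditions c&&bᵢ is the negation of the disjunction
lemma chain11 (c b1 b2 b3 b4 b5 b6 b7 b8 b9 b10 b11 : Bool) :
    (if c && b1 then false else if c && b2 then false else if c && b3 then false else
     if c && b4 then false else if c && b5 then false else if c && b6 then false else
     if c && b7 then false else if c && b8 then false else if c && b9 then false else
     if c && b10 then false else if c && b11 then false else true)
    = !(c && (b1 || b2 || b3 || b4 || b5 || b6 || b7 || b8 || b9 || b10 || b11)) := by
  cases c
  · simp
  · cases b1 <;> cases b2 <;> cases b3 <;> cases b4 <;> cases b5 <;> cases b6 <;> cases b7 <;>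
      cases b8 <;> cases b9 <;> cases b10 <;> cases b11 <;> rfl

-- one startswith test against a colon-terminated prefix, re-expressed through the partition head
lemma sw (t : List Char) (p : String) (nm : List Char) (hp : p.toList = nm ++ [':']) (hnm : ':' ∉ nm) :
    PySem.Str.startswith (String.ofList t) p =
      (t.contains ':' && (t.takeWhile (fun c => c ≠ ':') == nm)) := by
  rw [Bool.eq_iff_iff]
  rw [show PySem.Str.startswith (String.ofList t) p
        = PySem.Chars.startswith (String.ofList t).toList p.toList from by simp]
  rw [PySem.Chars.startswith_iff, hp]
  rw [show (String.ofList t).toList = t from by simp]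
  rw [colon_prefix_iff _ _ hnm]
  simp

lemma checkBads_eq (t : List Char) :
    checkBads (String.ofList t) BAD_PREFIXES =
      !(t.contains ':' && NAMESPACES.contains (t.takeWhile (fun c => c ≠ ':'))) := by
  have h1 := sw t "Category:" "Category".toList (by decide) (by decide)
  have h2 := sw t "File:" "File".toList (by decide) (by decide)
  have h3 := sw t "Help:" "Help".toList (by decide) (by decide)
  have h4 := sw t "Portal:" "Portal".toList (by decide) (by decide)
  have h5 := sw t "Special:" "Special".toList (by decide) (by decide)
  have h6 := sw t "Template:" "Template".toList (by decide) (by decide)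
  have h7 := sw t "Talk:" "Talk".toList (by decide) (by decide)
  have h8 := sw t "Wikipedia:" "Wikipedia".toList (by decide) (by decide)
  have h9 := sw t "Module:" "Module".toList (by decide) (by decide)
  have h10 := sw t "Draft:" "Draft".toList (by decide) (by decide)
  have h11 := sw t "Book:" "Book".toList (by decide) (by decide)
  simp only [checkBads, BAD_PREFIXES, h1, h2, h3, h4, h5, h6, h7, h8, h9, h10, h11, NAMESPACES,
    List.contains_cons, List.contains_nil, Bool.or_false]
  rw [chain11]
  simp [Bool.or_assoc]

-- ===== VERDICT (by name: the statement is the Claim_ definition above) =====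
theorem is_article_link_spec : Claim_equal_is_article_link := by
  intro href _
  unfold Spec_is_article_link
  match href with
  | none => rfl
  | some h =>
    show (if (h == "") || !(PySem.Str.startswith h "/wiki/") then false
          else if PySem.Str.isIn "#" h || PySem.Str.isIn "?" h then false
          else checkBads ((PySem.List.pyGet? ((PySem.Str.splitMax? h "/wiki/" 1).getD []) (-1)).getD "") BAD_PREFIXES)
        = (if h.toList.isEmpty || !(PySem.List.slice h.toList none (some 6) == "/wiki/".toList) then false
           else if (PySem.List.slice h.toList (some 6) none).any (fun c => PySem.Chars.isIn [c] "#?".toList) then false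
           else !((PySem.List.slice h.toList (some 6) none).contains ':' &&
                  NAMESPACES.contains ((PySem.List.slice h.toList (some 6) none).takeWhile (fun c => c ≠ ':'))))
    rw [guard1_eq h]
    by_cases hg : (h.toList.isEmpty || !(PySem.List.slice h.toList none (some 6) == "/wiki/".toList)) = true
    · rw [if_pos hg, if_pos hg]
    · rw [if_neg hg, if_neg hg]
      -- the failed guard yields the "/wiki/" prefix
      have hpre : "/wiki/".toList <+: h.toList := by
        have hsl : (PySem.List.slice h.toList none (some 6) == "/wiki/".toList) = true := by
          cases hb : (PySem.List.slice h.toList none (some 6) == "/wiki/".toList)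
          · exact absurd (by rw [hb]; simp) hg
          · rfl
        rw [PySem.List.slice_to h.toList (by norm_num : (0:Int) ≤ 6)] at hsl
        rw [List.prefix_iff_eq_take]
        have := beq_iff_eq.1 hsl
        simpa [eq_comm] using this
      obtain ⟨t, hL⟩ := hpre
      have hL' : h.toList = "/wiki/".toList ++ t := hL.symm
      have htopicB : PySem.List.slice h.toList (some 6) none = t := by
        rw [PySem.List.slice_from h.toList (by norm_num : (0:Int) ≤ 6), hL']
        rw [show ((6:Int).toNat) = ("/wiki/".toList).length from rfl]
        exact List.drop_left
      rw [hashq_eq h t hL', topicA_eq h t hL', htopicB, checkBads_eq t]
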